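-- pv_equiv track=rewrite | github.com/fmotoyama/pbcn_env | pbcn.py | is_controlled
-- ===== SOURCE A (Python) =====
-- from collections import defaultdict
--
-- def is_controlled(transition_list, target_x):
--     """全ての状態がtarget_xのbasinであることを確認する"""
--     # 自分の遷移前を表現する辞書を作成
--     transition_list_inv = defaultdict(set)
--     for x,temp in transition_list.items():
--         for next_x in temp[0]:
--             transition_list_inv[next_x].add(x)
--
--     # 目標状態から遷移前をさかのぼる
--     targets = {''.join(str(int(val)) for val in target_x)}  # 探索対象
--     while targets:
--         targets2 = set()
--         for x in targets:
--             xs_parent = transition_list_inv.pop(x, None)    # 一度探索した状態は表から削除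
--             if xs_parent:
--                 targets2 = targets2 | xs_parent
--         targets = targets2
--
--     return transition_list_inv
-- ===== SOURCE B (Python) =====
-- from collections import defaultdict, deque
--
-- def is_controlled(transition_list, target_x):
--     """全ての状態がtarget_xのbasinであることを確認する"""
--     # inverse transition graph, built from a flat (next_x, x) edge list
--     edges = [(next_x, x) for x, temp in transition_list.items() for next_x in temp[0]]
--     transition_list_inv = defaultdict(set)
--     for next_x, x in edges:
--         transition_list_inv[next_x].add(x)
--
--     # BFS from the target over the inverse graph with an explicit visited set
--     start = ''.join(str(int(val)) for val in target_x)
--     visited = set()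
--     queue = deque([start])
--     while queue:
--         x = queue.popleft()
--         if x in visited:
--             continue
--         visited.add(x)
--         queue.extend(transition_list_inv.get(x, ()))
--
--     # keep exactly the inverse-graph entries never visited
--     result = defaultdict(set)
--     for key, parents in transition_list_inv.items():
--         if key not in visited:
--             result[key] = parents
--     return result
-- ===== Notes on version B (the rewrite author's own statement) =====
-- stated objective: alternative
-- what changed: A marks explored states by destructively popping them from the inverse dict in frontier-by-frontier set rounds and returns the mutilated dict; B builds the inverse graph from a flat edge list, runs a standard deque BFS with an explicit visited set over the untouched graph, and produces the result by a final filtering pass keeping the entries whose key was never visited.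
-- outside the precondition, e.g. on is_controlled({'0': []}, [0]): A raises IndexError, B raises IndexError
import Mathlib
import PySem

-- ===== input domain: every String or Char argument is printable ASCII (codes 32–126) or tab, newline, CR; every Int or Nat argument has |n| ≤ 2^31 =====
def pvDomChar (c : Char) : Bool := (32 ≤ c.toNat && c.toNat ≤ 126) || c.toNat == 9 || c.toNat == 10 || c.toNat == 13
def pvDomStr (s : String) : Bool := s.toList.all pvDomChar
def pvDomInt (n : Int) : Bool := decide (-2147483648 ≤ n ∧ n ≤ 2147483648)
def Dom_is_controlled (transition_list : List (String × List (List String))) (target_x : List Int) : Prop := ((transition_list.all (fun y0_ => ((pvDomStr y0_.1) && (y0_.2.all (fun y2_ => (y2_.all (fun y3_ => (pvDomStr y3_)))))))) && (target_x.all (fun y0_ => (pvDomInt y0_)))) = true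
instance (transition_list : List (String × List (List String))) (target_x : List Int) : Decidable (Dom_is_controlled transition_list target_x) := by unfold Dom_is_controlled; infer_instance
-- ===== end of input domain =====

-- B replaces A's destructive frontier-round popping of the inverse dict with a deque BFS over the
-- untouched graph plus a final filtering pass (objective: alternative decomposition, same cost).

-- ===== PORT A =====
-- temp[0]: Pre_ guarantees temp ≠ [] so pyGet? is `some` (exact there); `[]` only on excluded inputs
def pvHead0 (temp : List (List String)) : List String := (PySem.List.pyGet? temp 0).getD []

-- ''.join(str(int(val)) for val in target_x)
def pvTargetStr (target_x : List Int) : String :=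
  PySem.Str.join "" (target_x.map (fun v => PySem.Int.toStr v))

-- A: nested for-loops filling transition_list_inv (defaultdict(set))
def pvBuildInv (transition_list : List (String × List (List String))) :
    PySem.Dict String (PySem.Set String) :=
  transition_list.foldl
    (fun d p => (pvHead0 p.2).foldl
      (fun d nx => d.modify nx [] (fun s => PySem.Set.add s p.1)) d)
    PySem.Dict.empty

-- body of "for x in targets": xs_parent = inv.pop(x, None); if xs_parent: targets2 |= xs_parent
def pvAStep (s : PySem.Dict String (PySem.Set String) × PySem.Set String) (x : String) :
    PySem.Dict String (PySem.Set String) × PySem.Set String :=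
  match s.1.pop? x with
  | none => s
  | some (v, d') => (d', if v = [] then s.2 else PySem.Set.union s.2 v)

-- termination facts for the while loop (cited by `decreasing_by` below)
theorem pvAStep_size (s : PySem.Dict String (PySem.Set String) × PySem.Set String) (x : String) :
    (pvAStep s x).1.size ≤ s.1.size ∧ ((pvAStep s x).1.size = s.1.size → (pvAStep s x).2 = s.2) := by
  cases h : s.1.pop? x with
  | none => simp [pvAStep, h]
  | some p =>
    obtain ⟨v, d'⟩ := p
    have hstep : pvAStep s x = (d', if v = [] then s.2 else PySem.Set.union s.2 v) := by
      simp [pvAStep, h]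
    have hd' : d' = s.1.erase x ∧ s.1.get? x = some v := by
      simp only [PySem.Dict.pop?, Option.map_eq_some_iff] at h
      obtain ⟨w, hw, hww⟩ := h; cases hww; exact ⟨rfl, hw⟩
    obtain ⟨rfl, hg⟩ := hd'
    have hx : (s.1.erase x).size < s.1.size := by
      simp only [PySem.Dict.get?, Option.map_eq_some_iff] at hg
      obtain ⟨p, hp, -⟩ := hg
      have hpm := List.mem_of_find?_eq_some hp
      have hpk : (p.1 == x) = true := (List.find?_eq_some_iff_append.mp hp).1
      simp only [PySem.Dict.erase, PySem.Dict.size]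
      obtain ⟨u, w, hsplit⟩ := List.append_of_mem hpm
      have hu := List.length_filter_le (fun p => !p.1 == x) u
      have hw := List.length_filter_le (fun p => !p.1 == x) w
      rw [hsplit]
      simp [List.filter_append, hpk]
      omega
    rw [hstep]
    exact ⟨Nat.le_of_lt hx, fun he => absurd he hx.ne⟩

theorem pvAFold_size (ts : List String) (s : PySem.Dict String (PySem.Set String) × PySem.Set String) :
    (ts.foldl pvAStep s).1.size ≤ s.1.size ∧
      ((ts.foldl pvAStep s).1.size = s.1.size → (ts.foldl pvAStep s).2 = s.2) := by
  induction ts generalizing s with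
  | nil => simp
  | cons x rest ih =>
    simp only [List.foldl_cons]
    obtain ⟨h1, h2⟩ := pvAStep_size s x
    obtain ⟨h3, h4⟩ := ih (pvAStep s x)
    exact ⟨le_trans h3 h1, fun he => by rw [h4 (by omega), h2 (by omega)]⟩

-- while targets: targets2 = set(); for x in targets: …; targets = targets2
def pvALoop (inv : PySem.Dict String (PySem.Set String)) (targets : PySem.Set String) :
    PySem.Dict String (PySem.Set String) :=
  if targets = [] then inv
  else
    let s := targets.foldl pvAStep (inv, PySem.Set.empty)
    pvALoop s.1 s.2
termination_by inv.size * 2 + (if targets = [] then 0 else 1)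
decreasing_by
  obtain ⟨h1, h2⟩ := pvAFold_size targets (inv, PySem.Set.empty)
  simp only [List.foldl_attach] at *
  split
  · omega
  · rename_i hne
    rcases Nat.lt_or_ge (targets.foldl pvAStep (inv, PySem.Set.empty)).1.size inv.size with h | h
    · omega
    · have h3 := h2 (by omega)
      simp only [h3] at hne
      simp [PySem.Set.empty] at hne

def is_controlled (transition_list : List (String × List (List String))) (target_x : List Int) :
    List (String × List String) :=
  let transition_list_inv := pvBuildInv transition_list
  let targets : PySem.Set String := PySem.Set.add PySem.Set.empty (pvTargetStr target_x)
  (pvALoop transition_list_inv targets).items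

-- ===== PORT B =====
-- edges = [(next_x, x) for x, temp in transition_list.items() for next_x in temp[0]], grouped into the dict
def pvBuildInvB (transition_list : List (String × List (List String))) :
    PySem.Dict String (PySem.Set String) :=
  (transition_list.flatMap (fun p => (pvHead0 p.2).map (fun nx => (nx, p.1)))).foldl
    (fun d e => d.modify e.1 [] (fun s => PySem.Set.add s e.2)) PySem.Dict.empty

-- termination fact for the BFS (cited by `decreasing_by` below)
theorem pvBfs_key_dec {visited : PySem.Set String} {x : String} (keys : List String)
    (hvis : PySem.Set.contains visited x = false) (hk : x ∈ keys) :
    (keys.filter (fun k => ! PySem.Set.contains (PySem.Set.add visited x) k)).length <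
      (keys.filter (fun k => ! PySem.Set.contains visited k)).length := by
  have hxm : x ∉ visited := by
    simpa [PySem.Set.contains, List.contains_eq_mem] using hvis
  have hmono : ∀ (l : List String),
      (l.filter (fun k => ! PySem.Set.contains (PySem.Set.add visited x) k)).length ≤
      (l.filter (fun k => ! PySem.Set.contains visited k)).length := by
    intro l
    rw [← List.countP_eq_length_filter, ← List.countP_eq_length_filter]
    apply List.countP_mono_left
    intro a _ ha
    simp only [PySem.Set.contains, List.contains_eq_mem, Bool.not_eq_eq_eq_not, Bool.not_true,
      decide_eq_false_iff_not, PySem.Set.mem_add] at *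
    tauto
  obtain ⟨s, t, rfl⟩ := List.append_of_mem hk
  have h1 : (! PySem.Set.contains (PySem.Set.add visited x) x) = false := by
    simp [PySem.Set.contains, List.contains_eq_mem, PySem.Set.mem_add]
  have h2 : (! PySem.Set.contains visited x) = true := by
    simp [PySem.Set.contains, List.contains_eq_mem, hxm]
  have hs := hmono s
  have ht := hmono t
  simp only [List.filter_append, List.filter_cons, h1, h2, Bool.false_eq_true, reduceIte,
    List.length_append, List.length_cons]
  omega

-- while queue: x = queue.popleft(); if seen continue; mark; queue.extend(inv.get(x, ()))
def pvBfs (inv : PySem.Dict String (PySem.Set String)) :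
    List String → PySem.Set String → PySem.Set String
  | [], visited => visited
  | x :: q, visited =>
    if PySem.Set.contains visited x then pvBfs inv q visited
    else pvBfs inv (q ++ inv.getD x []) (PySem.Set.add visited x)
termination_by queue visited =>
  ((inv.keys.filter (fun k => ! PySem.Set.contains visited k)).length, queue.length)
decreasing_by
  · apply Prod.Lex.right; simp
  · rename_i hvis
    rw [Bool.not_eq_true] at hvis
    by_cases hk : x ∈ inv.keys
    · exact Prod.Lex.left _ _ (pvBfs_key_dec inv.keys hvis hk)
    · have hgd : inv.getD x [] = [] := by
        apply PySem.Dict.getD_of_not_contains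
        rw [PySem.Dict.contains_eq_decide_mem_keys]; simp [hk]
      have hfeq : inv.keys.filter (fun k => ! PySem.Set.contains (PySem.Set.add visited x) k) =
          inv.keys.filter (fun k => ! PySem.Set.contains visited k) := by
        apply List.filter_congr
        intro a ha
        have hax : a ≠ x := fun h => hk (h ▸ ha)
        simp [PySem.Set.contains, PySem.Set.mem_add, hax]
      rw [hfeq, hgd]
      apply Prod.Lex.right; simp
-- result = defaultdict(set); for key, parents in inv.items(): if key not in visited: result[key] = parents
def is_controlled_alt (transition_list : List (String × List (List String))) (target_x : List Int) :
    List (String × List String) :=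
  let inv := pvBuildInvB transition_list
  let start := pvTargetStr target_x
  let visited := pvBfs inv [start] PySem.Set.empty
  (inv.items.foldl
    (fun r kv => if ! PySem.Set.contains visited kv.1 then r.insert kv.1 kv.2 else r)
    PySem.Dict.empty).items

-- ===== PRECONDITION & SPEC =====
-- Pre_ excludes association lists with duplicate keys (Python receives a dict, which collapses them)
-- and entries whose transition list is empty, on which A raises IndexError at temp[0] (and B does too).
def Pre_is_controlled (transition_list : List (String × List (List String))) (target_x : List Int) : Prop :=
  (transition_list.map Prod.fst).Nodup ∧ ∀ p ∈ transition_list, p.2 ≠ []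
instance (transition_list : List (String × List (List String))) (target_x : List Int) : Decidable (Pre_is_controlled transition_list target_x) := by unfold Pre_is_controlled; infer_instance

def pvWitness_is_controlled : (List (String × List (List String))) × List Int :=
  ([("0", [["0"]]), ("1", [["0"]])], [0])

def Spec_is_controlled (transition_list : List (String × List (List String))) (target_x : List Int) (out : List (String × List String)) : Prop := out = is_controlled_alt transition_list target_x
instance (transition_list : List (String × List (List String))) (target_x : List Int) (out : List (String × List String)) : Decidable (Spec_is_controlled transition_list target_x out) := by unfold Spec_is_controlled; infer_instance

-- ===== CLAIM (what is proved, stated in full; the proofs are below) =====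
def Claim_equal_is_controlled : Prop := ∀ (transition_list : List (String × List (List String))) (target_x : List Int), Dom_is_controlled transition_list target_x → Pre_is_controlled transition_list target_x → Spec_is_controlled transition_list target_x (is_controlled transition_list target_x)

-- ===== LEMMAS AND PROOFS =====

-- backward reachability from t through the inverse graph inv (t itself, and inductively the parents)
inductive pvReach (inv : PySem.Dict String (PySem.Set String)) (t : String) : String → Prop
  | base : pvReach inv t t
  | step {x y : String} : pvReach inv t x → y ∈ inv.getD x [] → pvReach inv t y

-- the two inverse-graph builders agree
theorem pvBuildInvB_eq (transition_list : List (String × List (List String))) :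
    pvBuildInvB transition_list = pvBuildInv transition_list := by
  unfold pvBuildInvB pvBuildInv
  rw [List.foldl_flatMap]
  simp only [List.foldl_map]

theorem nodup_keys_pvBuildInv (transition_list : List (String × List (List String))) :
    (pvBuildInv transition_list).keys.Nodup := by
  unfold pvBuildInv
  have h : ∀ (l : List (String × List (List String))) (d : PySem.Dict String (PySem.Set String)),
      d.keys.Nodup →
      (l.foldl (fun d p => (pvHead0 p.2).foldl
        (fun d nx => d.modify nx [] (fun s => PySem.Set.add s p.1)) d) d).keys.Nodup := by
    intro l
    induction l with
    | nil => intro d hd; simpa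
    | cons p rest ih =>
      intro d hd
      simp only [List.foldl_cons]
      apply ih
      exact PySem.Dict.nodup_keys_foldl_modify_key (pvHead0 p.2) (fun x => x) []
        (fun _ _ s => PySem.Set.add s p.1) d hd
  exact h transition_list PySem.Dict.empty (by simp)

-- find? is unchanged by filtering out only non-matching elements
theorem pvFind?_filter {α : Type} (l : List α) (p q : α → Bool)
    (h : ∀ x ∈ l, p x = true → q x = true) : (l.filter q).find? p = l.find? p := by
  induction l with
  | nil => rfl
  | cons a rest ih =>
    rw [List.filter_cons]
    have ihr := ih (fun x hx => h x (List.mem_cons_of_mem a hx))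
    by_cases hq : q a = true
    · rw [if_pos hq, List.find?_cons, List.find?_cons]
      cases hp : p a <;> simp [ihr]
    · have hpa : p a = false := by
        cases hp : p a
        · rfl
        · exact absurd (h a List.mem_cons_self hp) hq
      rw [if_neg hq, List.find?_cons, hpa]
      simpa using ihr

-- lookups through a key-filtered dict
theorem pvGet?_mk_filter_mem {ν : Type} (l : List (String × ν)) (hnd : (l.map Prod.fst).Nodup)
    (q : String × ν → Bool) (k : String) (v : ν)
    (h : (PySem.Dict.mk (l.filter q)).get? k = some v) :
    (PySem.Dict.mk l).get? k = some v := by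
  simp only [PySem.Dict.get?, Option.map_eq_some_iff] at h
  obtain ⟨p, hp, hv⟩ := h
  have hpm : p ∈ l.filter q := List.mem_of_find?_eq_some hp
  have hpk : (p.1 == k) = true := (List.find?_eq_some_iff_append.mp hp).1
  have hpkv : p = (k, v) := by
    obtain ⟨a, b⟩ := p
    simp only [beq_iff_eq] at hpk
    simp only at hv
    simp [hpk, hv]
  subst hpkv
  have hml : (k, v) ∈ l := (List.mem_filter.mp hpm).1
  exact (PySem.Dict.get?_eq_some_iff_mem_items (PySem.Dict.mk l) k v hnd).mpr hml

theorem pvGet?_mk_filter_eq {ν : Type} (l : List (String × ν)) (q : String × ν → Bool) (k : String)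
    (h : ∀ p ∈ l, (p.1 == k) = true → q p = true) :
    (PySem.Dict.mk (l.filter q)).get? k = (PySem.Dict.mk l).get? k := by
  simp only [PySem.Dict.get?]
  rw [pvFind?_filter l (fun p => p.1 == k) q h]

-- one round of A's while loop: pops exactly the keys in ts, collects exactly their parents
theorem pvRound (ts : List String) (d : PySem.Dict String (PySem.Set String)) (acc : PySem.Set String) :
    (ts.foldl pvAStep (d, acc)).1.items = d.items.filter (fun kv => ! decide (kv.1 ∈ ts)) ∧
    ∀ y, y ∈ (ts.foldl pvAStep (d, acc)).2 ↔ y ∈ acc ∨ ∃ s ∈ ts, y ∈ d.getD s [] := by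
  induction ts generalizing d acc with
  | nil =>
    constructor
    · simp
    · intro y; simp
  | cons x rest ih =>
    simp only [List.foldl_cons]
    cases hg : d.get? x with
    | none =>
      have hstep : pvAStep (d, acc) x = (d, acc) := by simp [pvAStep, PySem.Dict.pop?, hg]
      rw [hstep]
      obtain ⟨ha, hb⟩ := ih d acc
      have hxk : x ∉ d.keys := (PySem.Dict.get?_eq_none_iff_not_mem_keys d x).mp hg
      have hgd : d.getD x [] = [] := PySem.Dict.getD_of_get?_eq_none d [] hg
      constructor
      · rw [ha]
        apply List.filter_congr
        intro kv hkv
        have hne : kv.1 ≠ x := by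
          intro he
          exact hxk (he ▸ List.mem_map_of_mem hkv)
        simp [List.mem_cons, hne]
      · intro y
        rw [hb y]
        simp only [List.mem_cons]
        constructor
        · rintro (hy | ⟨s, hs, hys⟩)
          · exact Or.inl hy
          · exact Or.inr ⟨s, Or.inr hs, hys⟩
        · rintro (hy | ⟨s, rfl | hs, hys⟩)
          · exact Or.inl hy
          · rw [hgd] at hys; cases hys
          · exact Or.inr ⟨s, hs, hys⟩
    | some v =>
      have hstep : pvAStep (d, acc) x =
          (d.erase x, if v = [] then acc else PySem.Set.union acc v) := by
        simp [pvAStep, PySem.Dict.pop?, hg]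
      rw [hstep]
      obtain ⟨ha, hb⟩ := ih (d.erase x) (if v = [] then acc else PySem.Set.union acc v)
      have herase : (d.erase x).items = d.items.filter (fun p => ! (p.1 == x)) := rfl
      have hgdx : d.getD x [] = v := PySem.Dict.getD_of_get?_eq_some d [] hg
      have hget_ne : ∀ s : String, s ≠ x → (d.erase x).getD s [] = d.getD s [] := by
        intro s hs
        rw [PySem.Dict.getD_eq_get?_getD, PySem.Dict.getD_eq_get?_getD]
        congr 1
        show (PySem.Dict.mk (d.items.filter (fun p => ! (p.1 == x)))).get? s = d.get? s
        apply pvGet?_mk_filter_eq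
        intro p _ hpk
        simp only [beq_iff_eq] at hpk
        simp [hpk, hs]
      have hget_x : (d.erase x).getD x [] = [] := by
        apply PySem.Dict.getD_of_get?_eq_none
        show (PySem.Dict.mk (d.items.filter (fun p => ! (p.1 == x)))).get? x = none
        simp only [PySem.Dict.get?, Option.map_eq_none_iff]
        rw [List.find?_eq_none]
        intro p hp
        have := (List.mem_filter.mp hp).2
        simp only [Bool.not_eq_eq_eq_not, Bool.not_true] at this
        simp [this]
      have hmemacc : ∀ y : String,
          y ∈ (if v = [] then acc else PySem.Set.union acc v) ↔ y ∈ acc ∨ y ∈ v := by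
        intro y
        by_cases hv : v = []
        · subst hv; simp
        · rw [if_neg hv, PySem.Set.mem_union]
      constructor
      · rw [ha, herase, List.filter_filter]
        apply List.filter_congr
        intro kv hkv
        by_cases hkx : kv.1 = x <;> simp [List.mem_cons, hkx]
      · intro y
        rw [hb y, hmemacc y]
        simp only [List.mem_cons]
        constructor
        · rintro ((hy | hyv) | ⟨s, hs, hys⟩)
          · exact Or.inl hy
          · exact Or.inr ⟨x, Or.inl rfl, hgdx ▸ hyv⟩
          · by_cases hsx : s = x
            · subst hsx; rw [hget_x] at hys; cases hys
            · exact Or.inr ⟨s, Or.inr hs, (hget_ne s hsx) ▸ hys⟩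
        · rintro (hy | ⟨s, rfl | hs, hys⟩)
          · exact Or.inl (Or.inl hy)
          · exact Or.inl (Or.inr (hgdx ▸ hys))
          · by_cases hsx : s = x
            · subst hsx; exact Or.inl (Or.inr (hgdx ▸ hys))
            · exact Or.inr ⟨s, hs, (hget_ne s hsx).symm ▸ hys⟩

-- A's whole loop: the surviving entries are exactly those whose key is not backward-reachable
theorem pvALoop_spec (inv0 : PySem.Dict String (PySem.Set String)) (hnd : inv0.keys.Nodup)
    (t : String) (inv : PySem.Dict String (PySem.Set String)) (targets : PySem.Set String) :
    ∀ R : List String,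
      inv = PySem.Dict.mk (inv0.items.filter (fun kv => ! decide (kv.1 ∈ R))) →
      (∀ r ∈ R, pvReach inv0 t r) → (∀ s ∈ targets, pvReach inv0 t s) →
      (∀ r ∈ R, ∀ p ∈ inv0.getD r [], p ∈ R ∨ p ∈ targets) →
      (t ∈ R ∨ t ∈ targets) →
      ∃ R' : List String,
        (pvALoop inv targets).items = inv0.items.filter (fun kv => ! decide (kv.1 ∈ R')) ∧
        (∀ x, x ∈ R' ↔ pvReach inv0 t x) := by
  fun_induction pvALoop inv targets with
  | case1 inv =>
    intro R heq hR hT hclo ht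
    refine ⟨R, ?_, ?_⟩
    · rw [heq]
    · intro x
      refine ⟨hR x, ?_⟩
      intro hx
      induction hx with
      | base =>
        rcases ht with h | h
        · exact h
        · cases h
      | step hx hy ihx =>
        rcases hclo _ ihx _ hy with h | h
        · exact h
        · cases h
  | case2 inv targets hemp s ih =>
    intro R heq hR hT hclo ht
    have hsfold : s = targets.foldl pvAStep (inv, PySem.Set.empty) := by
      show List.foldl (fun s x => match x with | ⟨x, _⟩ => pvAStep s x)
        (inv, PySem.Set.empty) targets.attach = _
      simp [List.foldl_attach]
    rw [hsfold] at ih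
    obtain ⟨hra, hrb⟩ := pvRound targets inv PySem.Set.empty
    -- lift round facts from inv to inv0
    have hitems : inv.items = inv0.items.filter (fun kv => ! decide (kv.1 ∈ R)) := by rw [heq]
    have hmemD : ∀ (s' : String) (y : String), y ∈ inv.getD s' [] → y ∈ inv0.getD s' [] := by
      intro s' y hy
      rw [PySem.Dict.getD_eq_get?_getD] at hy
      cases hget : inv.get? s' with
      | none => rw [hget] at hy; cases hy
      | some w =>
        rw [hget] at hy
        have : inv0.get? s' = some w := by
          apply pvGet?_mk_filter_mem inv0.items hnd _ s' w
          rw [← hitems]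
          have : PySem.Dict.mk inv.items = inv := rfl
          rw [this, hget]
        rw [PySem.Dict.getD_of_get?_eq_some inv0 [] this]
        exact hy
    have hmemD' : ∀ s' : String, s' ∉ R → inv.getD s' [] = inv0.getD s' [] := by
      intro s' hs'
      rw [PySem.Dict.getD_eq_get?_getD, PySem.Dict.getD_eq_get?_getD]
      congr 1
      have hinveq : inv.get? s' = (PySem.Dict.mk (inv0.items.filter (fun kv => ! decide (kv.1 ∈ R)))).get? s' := by
        rw [heq]
      rw [hinveq]
      apply pvGet?_mk_filter_eq
      intro p _ hpk
      simp only [beq_iff_eq] at hpk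
      simp [hpk, hs']
    refine ih (R ++ targets) ?_ ?_ ?_ ?_ ?_
    · -- new dict is inv0 filtered by R ++ targets
      apply PySem.Dict.ext
      rw [hra, hitems, List.filter_filter]
      apply List.filter_congr
      intro kv _
      by_cases h1 : kv.1 ∈ R <;> by_cases h2 : kv.1 ∈ targets <;>
        simp [List.mem_append, h1, h2]
    · intro r hr
      rcases List.mem_append.mp hr with h | h
      · exact hR r h
      · exact hT r h
    · intro y hy
      have := (hrb y).mp hy
      rcases this with h | ⟨s', hs', hys⟩
      · cases h
      · exact pvReach.step (hT s' hs') (hmemD s' y hys)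
    · intro r hr p hp
      rcases List.mem_append.mp hr with h | h
      · rcases hclo r h p hp with h' | h'
        · exact Or.inl (List.mem_append.mpr (Or.inl h'))
        · exact Or.inl (List.mem_append.mpr (Or.inr h'))
      · by_cases hrR : r ∈ R
        · rcases hclo r hrR p hp with h' | h'
          · exact Or.inl (List.mem_append.mpr (Or.inl h'))
          · exact Or.inl (List.mem_append.mpr (Or.inr h'))
        · have hp' : p ∈ inv.getD r [] := by rw [hmemD' r hrR]; exact hp
          exact Or.inr ((hrb p).mpr (Or.inr ⟨r, h, hp'⟩))
    · exact Or.inl (List.mem_append.mpr ht)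

-- BFS soundness: everything visited is backward-reachable
theorem pvBfs_sound (inv : PySem.Dict String (PySem.Set String)) (t : String)
    (queue : List String) (visited : PySem.Set String)
    (hv : ∀ v ∈ visited, pvReach inv t v) (hq : ∀ q ∈ queue, pvReach inv t q) :
    ∀ x ∈ pvBfs inv queue visited, pvReach inv t x := by
  fun_induction pvBfs inv queue visited with
  | case1 visited => exact hv
  | case2 x q visited hc ih =>
    exact ih hv (fun y hy => hq y (List.mem_cons_of_mem x hy))
  | case3 x q visited hc ih =>
    have hx : pvReach inv t x := hq x List.mem_cons_self
    apply ih
    · intro y hy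
      rcases (PySem.Set.mem_add visited x y).mp hy with h | rfl
      · exact hv y h
      · exact hx
    · intro y hy
      rcases List.mem_append.mp hy with h | h
      · exact hq y (List.mem_cons_of_mem x h)
      · exact pvReach.step hx h

-- BFS completeness ingredients: the result contains visited and queue and is closed under parents
theorem pvBfs_closed (inv : PySem.Dict String (PySem.Set String))
    (queue : List String) (visited : PySem.Set String)
    (hinv : ∀ v ∈ visited, ∀ p ∈ inv.getD v [], p ∈ visited ∨ p ∈ queue) :
    (∀ v ∈ visited, v ∈ pvBfs inv queue visited) ∧
    (∀ q ∈ queue, q ∈ pvBfs inv queue visited) ∧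
    (∀ v ∈ pvBfs inv queue visited, ∀ p ∈ inv.getD v [], p ∈ pvBfs inv queue visited) := by
  fun_induction pvBfs inv queue visited with
  | case1 visited =>
    refine ⟨fun v hv => hv, by simp, ?_⟩
    intro v hv p hp
    rcases hinv v hv p hp with h | h
    · exact h
    · cases h
  | case2 x q visited hc ih =>
    have hxv : x ∈ visited := by
      simpa [PySem.Set.contains, List.contains_eq_mem] using hc
    obtain ⟨i1, i2, i3⟩ := ih (by
      intro v hv p hp
      rcases hinv v hv p hp with h | h
      · exact Or.inl h
      · rcases List.mem_cons.mp h with rfl | h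
        · exact Or.inl hxv
        · exact Or.inr h)
    exact ⟨i1, fun y hy => by
      rcases List.mem_cons.mp hy with rfl | h
      · exact i1 y hxv
      · exact i2 y h, i3⟩
  | case3 x q visited hc ih =>
    obtain ⟨i1, i2, i3⟩ := ih (by
      intro v hv p hp
      rcases (PySem.Set.mem_add visited x v).mp hv with hv' | hvx
      · rcases hinv v hv' p hp with h | h
        · exact Or.inl ((PySem.Set.mem_add visited x p).mpr (Or.inl h))
        · rcases List.mem_cons.mp h with rfl | h
          · exact Or.inl ((PySem.Set.mem_add visited p p).mpr (Or.inr rfl))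
          · exact Or.inr (List.mem_append.mpr (Or.inl h))
      · exact Or.inr (List.mem_append.mpr (Or.inr (hvx ▸ hp))))
    refine ⟨?_, ?_, i3⟩
    · intro v hv
      exact i1 v ((PySem.Set.mem_add visited x v).mpr (Or.inl hv))
    · intro y hy
      rcases List.mem_cons.mp hy with rfl | h
      · exact i1 y ((PySem.Set.mem_add visited y y).mpr (Or.inr rfl))
      · exact i2 y (List.mem_append.mpr (Or.inl h))

-- ===== VERDICT (by name: the statement is the Claim_ definition above) =====
-- A's result and B's result are both inv0 filtered by the backward-reachable keys
theorem is_controlled_spec : Claim_equal_is_controlled := by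
  unfold Claim_equal_is_controlled
  intro tl tx _ _
  unfold Spec_is_controlled is_controlled is_controlled_alt
  rw [pvBuildInvB_eq]
  have hnd := nodup_keys_pvBuildInv tl
  set inv0 := pvBuildInv tl with hinv0
  set t := pvTargetStr tx with ht
  have hts : PySem.Set.add PySem.Set.empty t = [t] := by
    simp [PySem.Set.add, PySem.Set.empty, PySem.Set.contains]
  rw [hts]
  -- A side
  obtain ⟨R', hA, hRiff⟩ := pvALoop_spec inv0 hnd t inv0 [t] []
    (by apply PySem.Dict.ext; simp)
    (by simp)
    (by
      intro s hs
      rcases List.mem_cons.mp hs with rfl | h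
      · exact pvReach.base
      · cases h)
    (by simp)
    (Or.inr (List.mem_cons_self))
  -- B side: visited = the backward-reachable states
  set V := pvBfs inv0 [t] PySem.Set.empty with hV
  have hsound := pvBfs_sound inv0 t [t] PySem.Set.empty
    (by intro v hv; cases hv)
    (by
      intro q hq
      rcases List.mem_cons.mp hq with rfl | h
      · exact pvReach.base
      · cases h)
  have hclosed := pvBfs_closed inv0 [t] PySem.Set.empty (by intro v hv; cases hv)
  have hViff : ∀ x, x ∈ V ↔ pvReach inv0 t x := by
    intro x
    constructor
    · exact hsound x
    · intro hx
      induction hx with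
      | base => exact hclosed.2.1 t List.mem_cons_self
      | step hx hy ihx => exact hclosed.2.2 _ ihx _ hy
  -- B's filtering pass builds exactly the filtered items list
  have hB : (inv0.items.foldl
      (fun r kv => if ! PySem.Set.contains V kv.1 then r.insert kv.1 kv.2 else r)
      PySem.Dict.empty).items = inv0.items.filter (fun kv => ! PySem.Set.contains V kv.1) := by
    rw [PySem.List.foldl_if_eq_foldl_filter (fun kv => ! PySem.Set.contains V kv.1)
      (fun (r : PySem.Dict String (PySem.Set String)) (kv : String × PySem.Set String) => r.insert kv.1 kv.2)]
    rw [PySem.Dict.items_foldl_insert_fresh _ Prod.fst Prod.snd PySem.Dict.empty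
      (by
        intro a _
        show (PySem.Dict.empty : PySem.Dict String (PySem.Set String)).contains a.1 = false
        exact PySem.Dict.contains_empty a.1)
      (hnd.sublist (List.Sublist.map Prod.fst
        (List.filter_sublist (l := inv0.items) (p := fun kv => ! PySem.Set.contains V kv.1))))]
    simp [PySem.Dict.empty]
  rw [hA, hB]
  apply List.filter_congr
  intro kv _
  have h1 := hRiff kv.1
  have h2 := hViff kv.1
  simp only [PySem.Set.contains, List.contains_eq_mem]
  congr 1
  exact decide_eq_decide.mpr (h1.trans h2.symm)
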